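-- pv_equiv track=rewrite | github.com/collinchase20/Project2Networks | main.py | getDirectory
-- ===== SOURCE A (Python) =====
-- def getDirectory(string):
--     if "@" not in string:
--         initialString = string.split("/")
--         directory = ""
--         for i in range(len(initialString)):
--             if i == 0 or i == 1 or i == 2:
--                 continue
--             else:
--                 directory += "/"
--                 directory += initialString[i]
--         return directory
--     else:
--         initialString2 = string.split("@")[1]
--         directory = ""
--         urlSplit = initialString2.split("/")
--         for i in range(len(urlSplit)):
--             if i == 0:
--                 continue
--             else:
--                 directory += "/"
--                 directory += urlSplit[i]
--         return directory
-- ===== SOURCE B (Python) =====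
-- def getDirectory(string):
--     # Slice-based: find the slash where the directory starts and return the suffix,
--     # instead of splitting into a list and re-joining.
--     if "@" not in string:
--         p = string.find("/")
--         if p != -1:
--             p = string.find("/", p + 1)
--         if p != -1:
--             p = string.find("/", p + 1)
--         return "" if p == -1 else string[p:]
--     else:
--         s = string.split("@")[1]
--         p = s.find("/")
--         return "" if p == -1 else s[p:]
-- ===== Notes on version B (the rewrite author's own statement) =====
-- stated objective: simpler
-- what changed: B returns a single suffix slice of the string starting at the third slash (resp. the first slash after the at-sign part), located by repeated find, instead of splitting into a list and rebuilding the result with a loop of string concatenations.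
import Mathlib
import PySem

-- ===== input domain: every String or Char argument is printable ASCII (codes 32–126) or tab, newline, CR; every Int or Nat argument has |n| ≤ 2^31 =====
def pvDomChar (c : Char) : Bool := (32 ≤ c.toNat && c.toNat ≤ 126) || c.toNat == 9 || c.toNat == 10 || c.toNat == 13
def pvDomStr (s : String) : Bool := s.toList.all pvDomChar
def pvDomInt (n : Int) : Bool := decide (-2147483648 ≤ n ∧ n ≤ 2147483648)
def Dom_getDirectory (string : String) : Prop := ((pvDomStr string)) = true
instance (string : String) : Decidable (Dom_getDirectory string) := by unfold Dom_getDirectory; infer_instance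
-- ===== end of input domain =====

-- B returns a single suffix slice of the string located by repeated find, instead of
-- splitting into a list and rebuilding the result with a concatenation loop (objective: simpler).


-- ===== PORT A =====
def getDirectory (string : String) : String :=
  if !(PySem.Chars.isIn ['@'] string.toList) then
    let initialString := PySem.Chars.splitOn string.toList ['/']
    let directory := (PySem.List.pyRange 0 (PySem.List.len initialString)).foldl
      (fun directory i =>
        if i == 0 || i == 1 || i == 2 then directory
        else (directory ++ ['/']) ++ PySem.List.pyGetD initialString i [])
      []
    String.ofList directory
  else
    -- '@' ∈ string, so split('@') has ≥ 2 pieces and Python's [1] cannot raise; pyGetD is exact here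
    let initialString2 := PySem.List.pyGetD (PySem.Chars.splitOn string.toList ['@']) 1 []
    let urlSplit := PySem.Chars.splitOn initialString2 ['/']
    let directory := (PySem.List.pyRange 0 (PySem.List.len urlSplit)).foldl
      (fun directory i =>
        if i == 0 then directory
        else (directory ++ ['/']) ++ PySem.List.pyGetD urlSplit i [])
      []
    String.ofList directory

-- ===== PORT B =====
def getDirectory_alt (string : String) : String :=
  if !(PySem.Chars.isIn ['@'] string.toList) then
    let p0 := PySem.Chars.find string.toList ['/']
    let p1 := if p0 != -1 then PySem.Chars.findFrom string.toList ['/'] (p0 + 1) else p0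
    let p2 := if p1 != -1 then PySem.Chars.findFrom string.toList ['/'] (p1 + 1) else p1
    if p2 == -1 then "" else String.ofList (PySem.List.slice string.toList (some p2) none)
  else
    let s := PySem.List.pyGetD (PySem.Chars.splitOn string.toList ['@']) 1 []
    let p := PySem.Chars.find s ['/']
    if p == -1 then "" else String.ofList (PySem.List.slice s (some p) none)

-- ===== PRECONDITION & SPEC =====
def Spec_getDirectory (string : String) (out : String) : Prop := out = getDirectory_alt string
instance (string : String) (out : String) : Decidable (Spec_getDirectory string out) := by unfold Spec_getDirectory; infer_instance

-- ===== CLAIM (what is proved, stated in full; the proofs are below) =====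
def Claim_equal_getDirectory : Prop := ∀ (string : String), Dom_getDirectory string → Spec_getDirectory string (getDirectory string)

-- ===== LEMMAS AND PROOFS =====

-- prepend `pre` onto the head part
def mergeHead (pre : List Char) : List (List Char) → List (List Char)
  | [] => [pre]
  | h :: t => (pre ++ h) :: t

-- structural recursion computing Python's split on a one-char separator
def splitC (c : Char) : List Char → List (List Char)
  | [] => [[]]
  | a :: r => if a = c then [] :: splitC c r else mergeHead [a] (splitC c r)

theorem splitC_ne_nil (c : Char) (cs : List Char) : splitC c cs ≠ [] := by
  induction cs with
  | nil => simp [splitC]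
  | cons a r ih =>
    simp only [splitC]
    split
    · simp
    · cases h : splitC c r <;> simp [mergeHead]

theorem go_spec (c : Char) (fuel : Nat) (l cur : List Char) (acc : List (List Char))
    (h : l.length < fuel) :
    PySem.Chars.splitOn.go [c] fuel l cur acc
      = acc.reverse ++ mergeHead cur.reverse (splitC c l) := by
  induction fuel generalizing l cur acc with
  | zero => omega
  | succ fuel ih =>
    cases l with
    | nil => simp [PySem.Chars.splitOn.go, splitC, mergeHead]
    | cons a r =>
      simp only [PySem.Chars.splitOn.go]
      by_cases hac : a = c
      · subst hac
        have hpre : List.isPrefixOf [a] (a :: r) = true := by simp [List.isPrefixOf]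
        simp only [hpre, if_pos]
        have hdr : List.drop [a].length (a :: r) = r := rfl
        rw [hdr, ih r [] (cur.reverse :: acc) (by simpa using Nat.lt_of_succ_lt_succ h)]
        simp [splitC, mergeHead]
        cases hs : splitC a r with
        | nil => exact absurd hs (splitC_ne_nil a r)
        | cons x t => simp [mergeHead]
      · have hpre : List.isPrefixOf [c] (a :: r) = false := by
          simp [List.isPrefixOf]; exact fun hh => absurd hh.symm hac
        simp only [hpre, Bool.false_eq_true, if_neg, not_false_iff]
        rw [ih r (a :: cur) acc (by simpa using Nat.lt_of_succ_lt_succ h)]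
        simp only [splitC, if_neg hac]
        cases hs : splitC c r with
        | nil => exact absurd hs (splitC_ne_nil c r)
        | cons x t => simp [mergeHead]

theorem splitOn_eq_splitC (c : Char) (cs : List Char) :
    PySem.Chars.splitOn cs [c] = splitC c cs := by
  unfold PySem.Chars.splitOn
  rw [go_spec c (cs.length + 1) cs [] [] (by omega)]
  cases hs : splitC c cs with
  | nil => exact absurd hs (splitC_ne_nil c cs)
  | cons x t => simp [mergeHead]

theorem notMem_of_mem_splitC (c : Char) (cs : List Char) :
    ∀ p ∈ splitC c cs, c ∉ p := by
  induction cs with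
  | nil => simp [splitC]
  | cons a r ih =>
    simp only [splitC]
    split
    · intro p hp
      rcases List.mem_cons.mp hp with h | h
      · subst h; simp
      · exact ih p h
    · cases hs : splitC c r with
      | nil => exact absurd hs (splitC_ne_nil c r)
      | cons x t =>
        intro p hp
        rcases List.mem_cons.mp (by simpa [mergeHead, hs] using hp) with h | h
        · subst h
          intro hmem
          rcases List.mem_cons.mp hmem with h' | h'
          · exact ‹¬ a = c› h'.symm
          · exact ih x (by simp [hs]) h'
        · exact ih p (by simp [hs, h])

-- recomposition: the original list is head ++ flatMap (c :: ·) tail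
theorem splitC_join (c : Char) (cs : List Char) :
    ∀ h t, splitC c cs = h :: t → cs = h ++ t.flatMap (c :: ·) := by
  induction cs with
  | nil => intro h t he; simp [splitC] at he; simp [he.1, he.2]
  | cons a r ih =>
    intro h t he
    simp only [splitC] at he
    by_cases hac : a = c
    · rw [if_pos hac] at he
      cases hs : splitC c r with
      | nil => exact absurd hs (splitC_ne_nil c r)
      | cons x u =>
        rw [hs] at he
        injection he with h1 h2
        subst h1; subst h2
        simpa [hac] using ih x u hs
    · rw [if_neg hac] at he
      cases hs : splitC c r with
      | nil => exact absurd hs (splitC_ne_nil c r)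
      | cons x u =>
        rw [hs] at he
        simp only [mergeHead] at he
        injection he with h1 h2
        subst h1; subst h2
        simpa using ih x u hs

-- find of a one-char separator: absent ⇒ -1
theorem find_of_notMem (c : Char) (cs : List Char) (h : c ∉ cs) :
    PySem.Chars.find cs [c] = -1 := by
  rw [PySem.Chars.find_eq_neg_one_iff]
  rw [List.singleton_infix_iff c cs]
  exact h

-- find of a one-char separator: first occurrence right after a separator-free prefix
theorem find_concat (c : Char) (pre r : List Char) (h : c ∉ pre) :
    PySem.Chars.find (pre ++ c :: r) [c] = (pre.length : Int) := by
  set s := pre ++ c :: r with hs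
  have hmem : c ∈ s := by simp [hs]
  have hne : PySem.Chars.find s [c] ≠ -1 := by
    rw [Ne, PySem.Chars.find_eq_neg_one_iff, List.singleton_infix_iff c s]
    simpa using hmem
  have hnn : 0 ≤ PySem.Chars.find s [c] := by
    have := PySem.Chars.neg_one_le_find s [c]; omega
  obtain ⟨hpref, hmin⟩ := PySem.Chars.find_spec hnn
  set m := (PySem.Chars.find s [c]).toNat with hm
  have hme : m = pre.length := by
    by_contra hne'
    rcases Nat.lt_or_ge m pre.length with hlt | hge
    · -- s[m] = c inside the separator-free prefix: contradiction
      obtain ⟨t, ht⟩ := hpref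
      have h1 : s[m]? = some c := by
        have : (s.drop m)[0]? = some c := by rw [← ht]; rfl
        simpa [List.getElem?_drop] using this
      have h2 : pre[m]? = some c := by
        rw [hs] at h1
        rwa [List.getElem?_append_left hlt] at h1
      exact h (List.mem_of_getElem? h2)
    · have hgt : pre.length < m := lt_of_le_of_ne hge (fun he => hne' he.symm)
      have : ¬ ([c] <+: s.drop pre.length) := hmin pre.length hgt
      apply this
      rw [hs, List.drop_left]
      exact ⟨r, rfl⟩
  omega

-- invariant tying B's current find-result q to the parts not yet skipped
def PosInv (cs : List Char) (t : List (List Char)) (q : Int) : Prop :=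
  (q = -1 ∧ t = []) ∨
  (0 ≤ q ∧ q.toNat < cs.length ∧ cs.drop q.toNat = t.flatMap (fun p => '/' :: p) ∧
   t ≠ [] ∧ (∀ p ∈ t, '/' ∉ p))

theorem posInv_init (cs : List Char) (h : List Char) (t : List (List Char))
    (hsplit : splitC '/' cs = h :: t) :
    PosInv cs t (PySem.Chars.find cs ['/']) := by
  have hjoin := splitC_join '/' cs h t hsplit
  have hfree := notMem_of_mem_splitC '/' cs
  rw [hsplit] at hfree
  cases t with
  | nil =>
    left
    refine ⟨?_, rfl⟩
    rw [hjoin]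
    simpa using find_of_notMem '/' h (hfree h (by simp))
  | cons u rest =>
    right
    have hfind : PySem.Chars.find cs ['/'] = (h.length : Int) := by
      rw [hjoin]
      simpa using find_concat '/' h (u ++ rest.flatMap (fun p => '/' :: p)) (hfree h (by simp))
    have hdrop : cs.drop h.length = (u :: rest).flatMap (fun p => '/' :: p) := by
      rw [hjoin]; simp [List.drop_left]
    refine ⟨by rw [hfind]; positivity, ?_, ?_, by simp, ?_⟩
    · rw [hfind]
      simp only [Int.toNat_natCast]
      by_contra hc
      push_neg at hc
      simp [List.drop_eq_nil_of_le hc] at hdrop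
    · rw [hfind]; simpa using hdrop
    · intro p hp; exact hfree p (by simp [hp])

theorem posInv_step (cs : List Char) (t : List (List Char)) (q : Int)
    (hinv : PosInv cs t q) :
    PosInv cs t.tail (if q != -1 then PySem.Chars.findFrom cs ['/'] (q + 1) else q) := by
  rcases hinv with ⟨hq, ht⟩ | ⟨hq, hlt, hdrop, htne, hfree⟩
  · subst hq ht; simp [PosInv]
  · have hqne : (q != -1) = true := by simp; omega
    rw [if_pos hqne]
    cases t with
    | nil => exact absurd rfl htne
    | cons u rest =>
      have hk : q + 1 = ((q.toNat + 1 : Nat) : Int) := by omega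
      have hkle : q.toNat + 1 ≤ cs.length := by omega
      rw [hk, PySem.Chars.findFrom_natCast cs ['/'] (q.toNat + 1) hkle]
      have hdrop1 : cs.drop (q.toNat + 1) = u ++ rest.flatMap (fun p => '/' :: p) := by
        have : cs.drop (q.toNat + 1) = (cs.drop q.toNat).drop 1 := by
          rw [List.drop_drop]
        rw [this, hdrop]; simp
      cases rest with
      | nil =>
        have hfind : PySem.Chars.find (cs.drop (q.toNat + 1)) ['/'] = -1 := by
          rw [hdrop1]
          simpa using find_of_notMem '/' u (hfree u (by simp))
        rw [if_pos hfind]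
        left; exact ⟨rfl, rfl⟩
      | cons v rest' =>
        have hfind : PySem.Chars.find (cs.drop (q.toNat + 1)) ['/'] = (u.length : Int) := by
          rw [hdrop1]
          simpa using find_concat '/' u (v ++ rest'.flatMap (fun p => '/' :: p)) (hfree u (by simp))
        rw [hfind]
        rw [if_neg (by omega)]
        right
        have hdrop2 : cs.drop (q.toNat + 1 + u.length) = (v :: rest').flatMap (fun p => '/' :: p) := by
          rw [← List.drop_drop, hdrop1]
          simp [List.drop_left]
        set e := ((q.toNat + 1 : Nat) : Int) + (u.length : Int) with he
        have het : e.toNat = q.toNat + 1 + u.length := by omega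
        refine ⟨by omega, ?_, ?_, by simp, ?_⟩
        · rw [het]
          by_contra hc
          push_neg at hc
          simp [List.drop_eq_nil_of_le hc] at hdrop2
        · rw [het]; exact hdrop2
        · intro p hp; exact hfree p (by simp [List.mem_cons.mp hp])

theorem posInv_final (cs : List Char) (t : List (List Char)) (q : Int)
    (hinv : PosInv cs t q) :
    (if q == -1 then "" else String.ofList (PySem.List.slice cs (some q) none))
      = String.ofList (t.flatMap (fun p => '/' :: p)) := by
  rcases hinv with ⟨hq, ht⟩ | ⟨hq, _, hdrop, _, _⟩
  · subst hq ht; rfl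
  · rw [if_neg (by simp; omega)]
    rw [PySem.List.slice_from cs hq, hdrop]

-- A's index loop with the first k indices skipped is a flatMap over the dropped parts
theorem loopA (parts : List (List Char)) (k : Nat) (cond : Int → Bool)
    (hcond : ∀ i : Int, 0 ≤ i → (cond i = true ↔ i < k)) :
    (PySem.List.pyRange 0 (PySem.List.len parts)).foldl
      (fun d i => if cond i then d else (d ++ ['/']) ++ PySem.List.pyGetD parts i []) []
      = (parts.drop k).flatMap (fun p => '/' :: p) := by
  have hlen : PySem.List.len parts = (parts.length : Int) := by simp [PySem.List.len]
  by_cases hkn : k ≤ parts.length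
  · rw [hlen, PySem.List.pyRange_one_append 0 (k : Int) (parts.length : Int)
      (by positivity) (by exact_mod_cast hkn)]
    rw [List.foldl_append]
    have h1 : (PySem.List.pyRange 0 (k : Int)).foldl
        (fun d i => if cond i then d else (d ++ ['/']) ++ PySem.List.pyGetD parts i []) [] = [] := by
      rw [PySem.List.foldl_congr_mem _ _ (fun d _ => d) _ ?_]
      · exact List.foldl_fixed _
      · intro acc x hx
        obtain ⟨hx0, hxk⟩ := PySem.List.mem_pyRange_one.mp hx
        rw [if_pos ((hcond x hx0).mpr hxk)]
    rw [h1]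
    rw [PySem.List.foldl_congr_mem _ _
      (fun d i => (d ++ ['/']) ++ PySem.List.pyGetD parts i []) _ ?_]
    · rw [← hlen, PySem.List.foldl_pyRange_pyGetD parts []
        (fun d p => (d ++ ['/']) ++ p) [] (by positivity)]
      simp only [Int.toNat_natCast]
      have : ∀ (init : List Char), (parts.drop k).foldl (fun d p => (d ++ ['/']) ++ p) init
          = (parts.drop k).foldl (fun d p => d ++ ('/' :: p)) init := by
        intro init
        apply PySem.List.foldl_congr_mem
        intro acc x _
        simp
      rw [this, PySem.List.foldl_append_eq_flatMap]
      simp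
    · intro acc x hx
      obtain ⟨hx0, _⟩ := PySem.List.mem_pyRange_one.mp hx
      rw [if_neg]
      have hx0' : (0 : Int) ≤ x := le_trans (by positivity) hx0
      simp only [hcond x hx0']
      omega
  · have hnk : parts.length < k := by omega
    have hdrop : parts.drop k = [] := List.drop_eq_nil_of_le (le_of_lt hnk)
    rw [hdrop, hlen]
    rw [PySem.List.foldl_congr_mem _ _ (fun d _ => d) _ ?_]
    · simp [List.foldl_fixed]
    · intro acc x hx
      obtain ⟨hx0, hxn⟩ := PySem.List.mem_pyRange_one.mp hx
      rw [if_pos ((hcond x hx0).mpr (by exact_mod_cast lt_trans hxn (by exact_mod_cast hnk)))]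

-- one branch of the equivalence: A's split-loop over cs equals B's find chain over cs,
-- with k parts skipped (k = 3 slashes for the plain URL, k = 1 for the part after '@')
theorem branch_eq (cs : List Char) :
    String.ofList ((PySem.List.pyRange 0 (PySem.List.len (PySem.Chars.splitOn cs ['/']))).foldl
      (fun d i => if i == 0 || i == 1 || i == 2 then d
                  else (d ++ ['/']) ++ PySem.List.pyGetD (PySem.Chars.splitOn cs ['/']) i []) [])
      = (let p0 := PySem.Chars.find cs ['/']
         let p1 := if p0 != -1 then PySem.Chars.findFrom cs ['/'] (p0 + 1) else p0
         let p2 := if p1 != -1 then PySem.Chars.findFrom cs ['/'] (p1 + 1) else p1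
         if p2 == -1 then "" else String.ofList (PySem.List.slice cs (some p2) none)) := by
  rw [splitOn_eq_splitC '/' cs]
  cases hs : splitC '/' cs with
  | nil => exact absurd hs (splitC_ne_nil '/' cs)
  | cons h t =>
    have hA : (PySem.List.pyRange 0 (PySem.List.len (h :: t))).foldl
        (fun d i => if i == 0 || i == 1 || i == 2 then d
                    else (d ++ ['/']) ++ PySem.List.pyGetD (h :: t) i []) []
        = ((h :: t).drop 3).flatMap (fun p => '/' :: p) := by
      apply loopA (h :: t) 3
      intro i hi
      constructor
      · intro hc
        rcases (by simpa using hc : (i = 0 ∨ i = 1) ∨ i = 2) with (h | h) | h <;> omega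
      · intro hlt
        simp only [beq_iff_eq, Bool.or_eq_true]
        omega
    rw [hA]
    have hinv0 := posInv_init cs h t hs
    have hinv1 := posInv_step cs t _ hinv0
    have hinv2 := posInv_step cs t.tail _ hinv1
    have hfin := posInv_final cs t.tail.tail _ hinv2
    have hdrop3 : (h :: t).drop 3 = t.tail.tail := by
      cases t with
      | nil => rfl
      | cons a u => cases u <;> rfl
    rw [hdrop3]
    exact hfin.symm

theorem branch_eq_at (cs : List Char) :
    String.ofList ((PySem.List.pyRange 0 (PySem.List.len (PySem.Chars.splitOn cs ['/']))).foldl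
      (fun d i => if i == 0 then d
                  else (d ++ ['/']) ++ PySem.List.pyGetD (PySem.Chars.splitOn cs ['/']) i []) [])
      = (if PySem.Chars.find cs ['/'] == -1 then ""
         else String.ofList (PySem.List.slice cs (some (PySem.Chars.find cs ['/'])) none)) := by
  rw [splitOn_eq_splitC '/' cs]
  cases hs : splitC '/' cs with
  | nil => exact absurd hs (splitC_ne_nil '/' cs)
  | cons h t =>
    have hA : (PySem.List.pyRange 0 (PySem.List.len (h :: t))).foldl
        (fun d i => if i == 0 then d
                    else (d ++ ['/']) ++ PySem.List.pyGetD (h :: t) i []) []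
        = ((h :: t).drop 1).flatMap (fun p => '/' :: p) := by
      apply loopA (h :: t) 1
      intro i hi
      simp only [beq_iff_eq]
      omega
    rw [hA]
    have hinv0 := posInv_init cs h t hs
    have hfin := posInv_final cs t _ hinv0
    have hdrop1 : (h :: t).drop 1 = t := rfl
    rw [hdrop1]
    exact hfin.symm

-- ===== VERDICT (by name: the statement is the Claim_ definition above) =====
theorem getDirectory_spec : Claim_equal_getDirectory := by
  intro string _
  unfold Spec_getDirectory getDirectory getDirectory_alt
  by_cases hat : PySem.Chars.isIn ['@'] string.toList
  · rw [if_neg (by simp [hat]), if_neg (by simp [hat])]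
    exact branch_eq_at _
  · rw [if_pos (by simp [hat]), if_pos (by simp [hat])]
    exact branch_eq _
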